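-- pv_equiv track=rewrite | github.com/Mraxzist/OculusCheck | OculusCheck/orchestrator/runner.py | _expand_names
-- ===== SOURCE A (Python) =====
-- from typing import List
--
-- def _expand_names(names: List[str]) -> List[str]:
--     expanded: List[str] = []
--     for n in names or []:
--         if n == "all":
--             expanded.extend(["virustotal", "malwarebazaar"])
--         else:
--             expanded.append(n)
--
--     order: List[str] = []
--     for candidate in ("virustotal", "malwarebazaar"):
--         if candidate in expanded and candidate not in order:
--             order.append(candidate)
--     # In dev. There will be new sources in the future
--     for n in expanded:
--         if n not in order:
--             order.append(n)
--     return order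
-- ===== SOURCE B (Python) =====
-- from typing import List
--
-- def _expand_names(names: List[str]) -> List[str]:
--     # Single pass over the raw names with two priority flags; the expanded
--     # intermediate list of A is never built, and no global dedup pass is needed:
--     # "all"/priority mentions only flip flags, other names are collected once.
--     vt = False
--     mb = False
--     others: List[str] = []
--     for n in names or []:
--         if n == "all" or n == "virustotal":
--             vt = True
--         if n == "all" or n == "malwarebazaar":
--             mb = True
--         if n != "all" and n != "virustotal" and n != "malwarebazaar" and n not in others:
--             others.append(n)
--     head: List[str] = []
--     if vt:
--         head.append("virustotal")
--     if mb:
--         head.append("malwarebazaar")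
--     return head + others
-- ===== Notes on version B (the rewrite author's own statement) =====
-- stated objective: alternative
-- what changed: B never materializes A's expanded list and has no dedup-against-result passes: one pass over the raw names maintains two boolean priority flags (set by 'all' or a direct mention) and a first-occurrence list of the other names, then prepends the flagged priorities.
import Mathlib
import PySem

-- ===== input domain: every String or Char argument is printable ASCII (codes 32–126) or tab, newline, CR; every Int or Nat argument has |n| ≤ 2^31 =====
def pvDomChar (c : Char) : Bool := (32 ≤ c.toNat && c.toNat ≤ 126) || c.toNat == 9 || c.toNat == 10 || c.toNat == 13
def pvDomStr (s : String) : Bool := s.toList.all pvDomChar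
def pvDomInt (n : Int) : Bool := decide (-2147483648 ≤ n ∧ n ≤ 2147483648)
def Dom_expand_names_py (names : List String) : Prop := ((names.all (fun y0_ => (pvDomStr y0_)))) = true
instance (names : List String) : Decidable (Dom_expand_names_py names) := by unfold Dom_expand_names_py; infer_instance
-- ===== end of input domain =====

-- B replaces A's expand-then-two-scan-dedup structure by a single pass over the raw names with
-- two priority flags and a first-occurrence list of other names; objective: alternative decomposition.


-- ===== PORT A =====
def expand_names_py (names : List String) : List String :=
  let expanded : List String :=
    names.foldl (fun acc n =>
      if n == "all" then acc ++ ["virustotal", "malwarebazaar"] else acc ++ [n]) []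
  let order : List String :=
    ["virustotal", "malwarebazaar"].foldl (fun order candidate =>
      if expanded.contains candidate && !(order.contains candidate)
      then order ++ [candidate] else order) []
  expanded.foldl (fun order n =>
    if !(order.contains n) then order ++ [n] else order) order

-- ===== PORT B =====
def expand_names_py_alt (names : List String) : List String :=
  let st := names.foldl (fun (st : Bool × Bool × List String) n =>
      let vt := if n == "all" || n == "virustotal" then true else st.1
      let mb := if n == "all" || n == "malwarebazaar" then true else st.2.1
      let others :=
        if n != "all" && n != "virustotal" && n != "malwarebazaar" && !(st.2.2.contains n)
        then st.2.2 ++ [n] else st.2.2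
      (vt, mb, others))
    (false, false, [])
  let head := (if st.1 then ["virustotal"] else []) ++ (if st.2.1 then ["malwarebazaar"] else [])
  head ++ st.2.2

-- ===== PRECONDITION & SPEC =====
def Spec_expand_names_py (names : List String) (out : List String) : Prop := out = expand_names_py_alt names
instance (names : List String) (out : List String) : Decidable (Spec_expand_names_py names out) := by unfold Spec_expand_names_py; infer_instance

-- ===== CLAIM =====
def Claim_equal_expand_names_py : Prop := ∀ (names : List String), Dom_expand_names_py names → Spec_expand_names_py names (expand_names_py names)

-- ===== LEMMAS AND PROOFS =====

-- A's second loop is exactly set-update (branch order flipped)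
theorem expand_loop_eq_update (e order : List String) :
    e.foldl (fun order n => if !(order.contains n) then order ++ [n] else order) order
      = PySem.Set.update order e := by
  rw [PySem.Set.update]
  apply PySem.List.foldl_congr_mem
  intro acc x _
  simp only [PySem.Set.add, Bool.not_eq_eq_eq_not, Bool.not_true]
  split <;> simp_all

-- A's expansion loop as a flatMap
theorem expand_fold_eq_flatMap (names : List String) :
    names.foldl (fun acc n =>
        if n == "all" then acc ++ ["virustotal", "malwarebazaar"] else acc ++ [n]) []
      = names.flatMap (fun n => if n == "all" then ["virustotal", "malwarebazaar"] else [n]) := by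
  have h := PySem.List.foldl_congr_mem (l := names) (init := ([] : List String))
      (f := fun acc n => if n == "all" then acc ++ ["virustotal", "malwarebazaar"] else acc ++ [n])
      (g := fun acc n => acc ++ (if n == "all" then ["virustotal", "malwarebazaar"] else [n]))
      (by intro acc x _; by_cases hx : x == "all" <;> simp [hx])
  rw [h, PySem.List.foldl_append_eq_flatMap, List.nil_append]

-- the non-priority, non-"all" names of the expanded list are exactly those of the raw names
theorem filter_expanded (names : List String) :
    (names.flatMap (fun n => if n == "all" then ["virustotal", "malwarebazaar"] else [n])).filter
        (fun x => !(["virustotal", "malwarebazaar"].contains x))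
      = names.filter (fun n => n != "all" && n != "virustotal" && n != "malwarebazaar") := by
  induction names with
  | nil => rfl
  | cons n ns ih =>
    simp only [List.flatMap_cons, List.filter_append, List.filter_cons, ih]
    by_cases h1 : n = "all"
    · simp [h1]
    · by_cases h2 : n = "virustotal"
      · simp [h1, h2]
      · by_cases h3 : n = "malwarebazaar" <;> simp [h1, h2, h3]

-- Set.update against a split accumulator: elements already covered by the prefix are skipped
theorem update_split (e : List String) (P D : List String) :
    PySem.Set.update (P ++ D) e
      = P ++ PySem.Set.update D (e.filter (fun x => !(P.contains x))) := by
  induction e generalizing D with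
  | nil => simp [PySem.Set.update]
  | cons x xs ih =>
    simp only [PySem.Set.update] at ih ⊢
    by_cases hp : x ∈ P
    · have h1 : PySem.Set.add (P ++ D) x = P ++ D := by simp [PySem.Set.add, hp]
      have h2 : List.filter (fun y => !(P.contains y)) (x :: xs)
          = List.filter (fun y => !(P.contains y)) xs := by simp [hp]
      rw [List.foldl_cons, h1, h2]; exact ih D
    · by_cases hd : x ∈ D
      · have h1 : PySem.Set.add (P ++ D) x = P ++ D := by simp [PySem.Set.add, hp, hd]
        have h2 : List.filter (fun y => !(P.contains y)) (x :: xs)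
            = x :: List.filter (fun y => !(P.contains y)) xs := by simp [hp]
        have h3 : PySem.Set.add D x = D := by simp [PySem.Set.add, hd]
        rw [List.foldl_cons, h1, h2, List.foldl_cons, h3]; exact ih D
      · have h1 : PySem.Set.add (P ++ D) x = P ++ (D ++ [x]) := by
          simp [PySem.Set.add, hp, hd]
        have h2 : List.filter (fun y => !(P.contains y)) (x :: xs)
            = x :: List.filter (fun y => !(P.contains y)) xs := by simp [hp]
        have h3 : PySem.Set.add D x = D ++ [x] := by simp [PySem.Set.add, hd]
        rw [List.foldl_cons, h1, h2, List.foldl_cons, h3]; exact ih (D ++ [x])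

-- invariant of B's single pass
theorem b_fold_inv (names : List String) (v m : Bool) (o : List String) :
    names.foldl (fun (st : Bool × Bool × List String) n =>
        let vt := if n == "all" || n == "virustotal" then true else st.1
        let mb := if n == "all" || n == "malwarebazaar" then true else st.2.1
        let others :=
          if n != "all" && n != "virustotal" && n != "malwarebazaar" && !(st.2.2.contains n)
          then st.2.2 ++ [n] else st.2.2
        (vt, mb, others)) (v, m, o)
      = ((v || names.any (fun n => n == "all" || n == "virustotal")),
         (m || names.any (fun n => n == "all" || n == "malwarebazaar")),
         PySem.Set.update o (names.filter (fun n => n != "all" && n != "virustotal" && n != "malwarebazaar"))) := by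
  induction names generalizing v m o with
  | nil => simp [PySem.Set.update]
  | cons n ns ih =>
    simp only [List.foldl_cons, List.any_cons, List.filter_cons]
    rw [ih]
    by_cases hq : (n != "all" && n != "virustotal" && n != "malwarebazaar") = true
    · have hn : (n == "all" || n == "virustotal") = false := by
        simp only [bne, Bool.and_eq_true, Bool.not_eq_eq_eq_not, Bool.not_true] at hq
        simp [hq.1.1, hq.1.2]
      have hm : (n == "all" || n == "malwarebazaar") = false := by
        simp only [bne, Bool.and_eq_true, Bool.not_eq_eq_eq_not, Bool.not_true] at hq
        simp [hq.1.1, hq.2]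
      simp only [hq, hn, hm, if_true, if_false, Bool.false_or]
      refine Prod.ext rfl (Prod.ext rfl ?_)
      simp only [PySem.Set.update, List.foldl_cons]
      congr 1
      simp only [PySem.Set.add]
      by_cases hc : o.contains n <;> simp [hc]
    · have hq' : (n != "all" && n != "virustotal" && n != "malwarebazaar") = false := by
        simpa using hq
      simp only [hq', Bool.false_and, if_false]
      by_cases hvt : (n == "all" || n == "virustotal") = true <;>
        by_cases hmb : (n == "all" || n == "malwarebazaar") = true <;>
          simp [hvt, hmb]

theorem mem_expanded_vt (names : List String) :
    (names.flatMap (fun n => if n == "all" then ["virustotal", "malwarebazaar"] else [n])).contains "virustotal"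
      = names.any (fun n => n == "all" || n == "virustotal") := by
  induction names with
  | nil => rfl
  | cons n ns ih =>
    simp only [List.flatMap_cons, List.contains_append, List.any_cons, ih]
    by_cases h1 : n = "all"
    · simp [h1]
    · by_cases h2 : n = "virustotal"
      · simp [h1, h2]
      · have h2' : ¬("virustotal" = n) := fun h => h2 h.symm
        simp [h1, h2, h2']

theorem mem_expanded_mb (names : List String) :
    (names.flatMap (fun n => if n == "all" then ["virustotal", "malwarebazaar"] else [n])).contains "malwarebazaar"
      = names.any (fun n => n == "all" || n == "malwarebazaar") := by
  induction names with
  | nil => rfl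
  | cons n ns ih =>
    simp only [List.flatMap_cons, List.contains_append, List.any_cons, ih]
    by_cases h1 : n = "all"
    · simp [h1]
    · by_cases h2 : n = "malwarebazaar"
      · simp [h1, h2]
      · have h2' : ¬("malwarebazaar" = n) := fun h => h2 h.symm
        simp [h1, h2, h2']

-- ===== VERDICT =====
theorem expand_names_py_spec : Claim_equal_expand_names_py := by
  intro names _
  show _ = _
  unfold expand_names_py expand_names_py_alt
  rw [expand_fold_eq_flatMap]
  set e := names.flatMap (fun n => if n == "all" then ["virustotal", "malwarebazaar"] else [n]) with he
  rw [expand_loop_eq_update, b_fold_inv]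
  have hmemv : e.contains "virustotal" = names.any (fun n => n == "all" || n == "virustotal") := by
    rw [he]; exact mem_expanded_vt names
  have hmemm : e.contains "malwarebazaar" = names.any (fun n => n == "all" || n == "malwarebazaar") := by
    rw [he]; exact mem_expanded_mb names
  have horder : (["virustotal", "malwarebazaar"].foldl (fun order candidate =>
        if e.contains candidate && !(order.contains candidate)
        then order ++ [candidate] else order) [])
      = (if e.contains "virustotal" then ["virustotal"] else []) ++
        (if e.contains "malwarebazaar" then ["malwarebazaar"] else []) := by
    by_cases hv : "virustotal" ∈ e <;> by_cases hm : "malwarebazaar" ∈ e <;>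
      simp [List.foldl, hv, hm]
  rw [horder]
  simp only [Bool.false_or, ← hmemv, ← hmemm]
  set P := (if e.contains "virustotal" = true then ["virustotal"] else []) ++
           (if e.contains "malwarebazaar" = true then ["malwarebazaar"] else []) with hP
  rw [show PySem.Set.update P e = PySem.Set.update (P ++ []) e from by rw [List.append_nil],
     update_split]
  congr 1
  rw [← filter_expanded]
  congr 1
  apply List.filter_congr
  intro x hx
  by_cases hxv : x = "virustotal"
  · subst hxv
    have hc : e.contains "virustotal" = true := by simpa using hx
    simp [hP, hc, hx]
  · by_cases hxm : x = "malwarebazaar"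
    · subst hxm
      have hc : e.contains "malwarebazaar" = true := by simpa using hx
      simp [hP, hc, hx]
    · have h1 : ¬("virustotal" = x) := fun h => hxv h.symm
      have h2 : ¬("malwarebazaar" = x) := fun h => hxm h.symm
      by_cases c1 : e.contains "virustotal" <;> by_cases c2 : e.contains "malwarebazaar" <;>
        simp [hP, c1, c2, h1, h2, hxv, hxm]
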